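-- pv_equiv track=rewrite | github.com/openstack/taskflow | taskflow/utils/misc.py | sequence_minus
-- ===== SOURCE A (Python) =====
-- def sequence_minus(seq1, seq2):
--     """Calculate difference of two sequences.
--
--     Result contains the elements from first sequence that are not
--     present in second sequence, in original order. Works even
--     if sequence elements are not hashable.
--     """
--     result = list(seq1)
--     for item in seq2:
--         try:
--             result.remove(item)
--         except ValueError:
--             pass
--     return result
-- ===== SOURCE B (Python) =====
-- def sequence_minus(seq1, seq2):
--     """Order-preserving multiset difference: single forward pass over seq1
--     consuming a shrinking pending-removals list (instead of A's repeated
--     remove-from-a-copy pass driven by seq2)."""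
--     to_remove = list(seq2)
--     result = []
--     for item in seq1:
--         if item in to_remove:
--             to_remove.remove(item)
--         else:
--             result.append(item)
--     return result
-- ===== Notes on version B (the rewrite author's own statement) =====
-- stated objective: alternative
-- what changed: B makes one forward pass over seq1 testing membership in a shrinking pending-removals copy of seq2, instead of A's loop over seq2 that calls result.remove on a copy of seq1 for each item.
import Mathlib
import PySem

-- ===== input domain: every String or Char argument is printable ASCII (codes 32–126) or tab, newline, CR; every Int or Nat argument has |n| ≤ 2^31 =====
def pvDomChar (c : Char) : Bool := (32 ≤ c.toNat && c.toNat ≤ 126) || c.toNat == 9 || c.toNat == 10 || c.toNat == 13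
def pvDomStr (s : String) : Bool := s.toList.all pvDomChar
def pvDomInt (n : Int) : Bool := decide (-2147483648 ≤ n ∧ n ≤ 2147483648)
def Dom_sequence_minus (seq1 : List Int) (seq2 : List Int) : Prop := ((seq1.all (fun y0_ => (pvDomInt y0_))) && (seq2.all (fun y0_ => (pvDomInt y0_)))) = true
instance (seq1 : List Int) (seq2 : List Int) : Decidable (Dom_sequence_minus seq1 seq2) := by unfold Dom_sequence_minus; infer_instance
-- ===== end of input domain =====

-- B replaces A's seq2-driven loop of result.remove calls by one forward pass over seq1
-- consuming a shrinking pending-removals copy of seq2 (objective: alternative decomposition).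

-- ===== PORT A =====
-- result = list(seq1); for item in seq2: try result.remove(item) except ValueError: pass
def sequence_minus (seq1 : List Int) (seq2 : List Int) : List Int :=
  seq2.foldl (fun result item =>
    match PySem.List.remove? result item with
    | some r => r          -- result.remove(item) succeeded
    | none => result)      -- ValueError: pass
    seq1

-- ===== PORT B =====
-- to_remove = list(seq2); one pass over seq1: drop the item (consuming it from
-- to_remove) if still pending, else append it to result.
def sequence_minus_alt (seq1 : List Int) (seq2 : List Int) : List Int :=
  (seq1.foldl (fun (st : List Int × List Int) item =>
      if item ∈ st.1 then ((PySem.List.remove? st.1 item).getD st.1, st.2)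
      else (st.1, st.2 ++ [item]))
    (seq2, [])).2

-- ===== PRECONDITION & SPEC =====
def Spec_sequence_minus (seq1 : List Int) (seq2 : List Int) (out : List Int) : Prop := out = sequence_minus_alt seq1 seq2
instance (seq1 : List Int) (seq2 : List Int) (out : List Int) : Decidable (Spec_sequence_minus seq1 seq2 out) := by unfold Spec_sequence_minus; infer_instance

-- ===== CLAIM (what is proved, stated in full; the proofs are below) =====
def Claim_equal_sequence_minus : Prop := ∀ (seq1 : List Int) (seq2 : List Int), Dom_sequence_minus seq1 seq2 → Spec_sequence_minus seq1 seq2 (sequence_minus seq1 seq2)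

-- ===== LEMMAS AND PROOFS =====

-- canonical form both ports reduce to: erase each element of rem once from xs
def eraseAll (xs rem : List Int) : List Int := rem.foldl (fun r v => r.erase v) xs

theorem eraseAll_nil (rem : List Int) : eraseAll [] rem = [] := by
  induction rem with
  | nil => rfl
  | cons v rem ih => simp [eraseAll, List.foldl] at ih ⊢; exact ih

theorem eraseAll_cons_not_mem (rem : List Int) (x : Int) (xs : List Int) (h : x ∉ rem) :
    eraseAll (x :: xs) rem = x :: eraseAll xs rem := by
  induction rem generalizing xs with
  | nil => rfl
  | cons v rem ih =>
    simp only [List.mem_cons, not_or] at h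
    simp only [eraseAll, List.foldl] at ih ⊢
    rw [List.erase_cons_tail (by simpa using fun e => h.1 e)]
    exact ih _ h.2

theorem eraseAll_cons_mem (rem : List Int) (x : Int) (xs : List Int) (h : x ∈ rem) :
    eraseAll (x :: xs) rem = eraseAll xs (rem.erase x) := by
  induction rem generalizing xs with
  | nil => cases h
  | cons v rem ih =>
    by_cases hv : v = x
    · subst hv
      simp [eraseAll, List.foldl, List.erase_cons_head]
    · have hx : x ∈ rem := by
        cases h with
        | head => exact absurd rfl hv
        | tail _ h => exact h
      simp only [eraseAll, List.foldl] at ih ⊢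
      rw [List.erase_cons_tail (by simpa using fun e => hv e.symm),
          List.erase_cons_tail (by simpa using hv)]
      simp only [List.foldl]
      exact ih _ hx

theorem portA_eq_eraseAll (seq1 seq2 : List Int) :
    sequence_minus seq1 seq2 = eraseAll seq1 seq2 := by
  unfold sequence_minus eraseAll
  induction seq2 generalizing seq1 with
  | nil => rfl
  | cons v rem ih =>
    simp only [List.foldl]
    by_cases hv : v ∈ seq1
    · rw [PySem.List.remove?_eq_some_erase _ _ hv]
      exact ih _
    · rw [(PySem.List.remove?_eq_none_iff _ _).mpr hv, List.erase_of_not_mem hv]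
      exact ih _

theorem portB_loop (seq1 rem acc : List Int) :
    (seq1.foldl (fun (st : List Int × List Int) item =>
        if item ∈ st.1 then ((PySem.List.remove? st.1 item).getD st.1, st.2)
        else (st.1, st.2 ++ [item]))
      (rem, acc)).2 = acc ++ eraseAll seq1 rem := by
  induction seq1 generalizing rem acc with
  | nil => simp [eraseAll_nil]
  | cons x xs ih =>
    simp only [List.foldl]
    by_cases h : x ∈ rem
    · rw [if_pos h, PySem.List.remove?_eq_some_erase _ _ h]
      simp only [Option.getD_some]
      rw [ih, eraseAll_cons_mem _ _ _ h]
    · rw [if_neg h, ih, eraseAll_cons_not_mem _ _ _ h]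
      simp

-- ===== VERDICT (by name: the statement is the Claim_ definition above) =====
theorem sequence_minus_spec : Claim_equal_sequence_minus := by
  intro seq1 seq2 _
  unfold Spec_sequence_minus sequence_minus_alt
  rw [portA_eq_eraseAll, portB_loop]
  simp
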